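-- pv_equiv track=rewrite | github.com/arthurjyong/rostermonsterv2 | python/rostermonster/analysis/aggregates.py | _max_consecutive_days_off
-- ===== SOURCE A (Python) =====
-- from typing import Any
--
-- def _max_consecutive_days_off(
--     candidate_assignments: list[dict[str, Any]],
--     doctor_id: str,
--     sorted_date_keys: list[str],
-- ) -> int:
--     """Longest run of consecutive `dayRecords` with no assignment to
--     `doctor_id`. Per §10.6 `maxConsecutiveDaysOff`.
--     """
--     days_with_doctor: set[str] = {
--         a["dateKey"] for a in candidate_assignments
--         if a.get("doctorId") == doctor_id
--     }
--     longest = 0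
--     running = 0
--     for dk in sorted_date_keys:
--         if dk in days_with_doctor:
--             running = 0
--         else:
--             running += 1
--             if running > longest:
--                 longest = running
--     return longest
-- ===== SOURCE B (Python) =====
-- def _max_consecutive_days_off(
--     candidate_assignments,
--     doctor_id,
--     sorted_date_keys,
-- ):
--     days_with_doctor = {
--         a["dateKey"] for a in candidate_assignments
--         if a.get("doctorId") == doctor_id
--     }
--     prev = -1
--     best = 0
--     for i, dk in enumerate(sorted_date_keys):
--         if dk in days_with_doctor:
--             best = max(best, i - prev - 1)
--             prev = i
--     return max(best, len(sorted_date_keys) - prev - 1)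
-- ===== Notes on version B (the rewrite author's own statement) =====
-- stated objective: alternative
-- what changed: Replaces the running off-day counter (reset on each on-day, maximum tracked incrementally) by a gap computation: track the index of the previous on-day and take the maximum gap between consecutive on-positions, with a final gap to the end of the list.
import Mathlib
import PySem

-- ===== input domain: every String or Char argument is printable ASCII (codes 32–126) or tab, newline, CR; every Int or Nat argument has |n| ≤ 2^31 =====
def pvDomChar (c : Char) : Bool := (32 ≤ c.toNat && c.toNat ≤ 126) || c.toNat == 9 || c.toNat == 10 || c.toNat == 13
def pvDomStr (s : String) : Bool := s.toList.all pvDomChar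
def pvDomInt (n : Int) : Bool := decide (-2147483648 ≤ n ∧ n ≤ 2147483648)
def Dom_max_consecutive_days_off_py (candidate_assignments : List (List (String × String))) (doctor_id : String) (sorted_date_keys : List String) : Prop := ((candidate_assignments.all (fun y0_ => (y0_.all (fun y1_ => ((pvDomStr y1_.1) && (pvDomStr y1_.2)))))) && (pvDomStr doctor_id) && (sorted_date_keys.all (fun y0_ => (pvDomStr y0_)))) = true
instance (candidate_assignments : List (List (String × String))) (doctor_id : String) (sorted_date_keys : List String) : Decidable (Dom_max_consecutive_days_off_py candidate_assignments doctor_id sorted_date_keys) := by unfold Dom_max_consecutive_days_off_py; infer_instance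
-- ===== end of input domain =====

-- B replaces A's running off-day counter by tracking the previous on-day index and taking the
-- largest gap between consecutive on-positions (alternative decomposition, same cost).

-- ===== PORT A =====
-- the set comprehension {a["dateKey"] for a in candidate_assignments if a.get("doctorId") == doctor_id}
-- (identical in both Pythons; a["dateKey"] is total here because Pre_ guarantees the key is present)
def pvDaysWith (candidate_assignments : List (List (String × String))) (doctor_id : String) : PySem.Set String :=
  candidate_assignments.foldl
    (fun s a =>
      if PySem.Dict.get? (PySem.Dict.mk a) "doctorId" == some doctor_id then
        PySem.Set.add s ((PySem.Dict.get? (PySem.Dict.mk a) "dateKey").getD "")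
      else s)
    PySem.Set.empty

def max_consecutive_days_off_py (candidate_assignments : List (List (String × String))) (doctor_id : String) (sorted_date_keys : List String) : Int :=
  let days_with_doctor := pvDaysWith candidate_assignments doctor_id
  -- longest = 0; running = 0; for dk in sorted_date_keys: …
  (sorted_date_keys.foldl
    (fun (st : Int × Int) dk =>
      if PySem.Set.contains days_with_doctor dk then (st.1, 0)
      else if st.2 + 1 > st.1 then (st.2 + 1, st.2 + 1) else (st.1, st.2 + 1))
    (0, 0)).1

-- ===== PORT B =====
def max_consecutive_days_off_py_alt (candidate_assignments : List (List (String × String))) (doctor_id : String) (sorted_date_keys : List String) : Int :=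
  let days_with_doctor := pvDaysWith candidate_assignments doctor_id
  -- prev = -1; best = 0; for i, dk in enumerate(sorted_date_keys): …
  let st := (PySem.List.enumerate sorted_date_keys 0).foldl
    (fun (st : Int × Int) q =>
      if PySem.Set.contains days_with_doctor q.2 then (q.1, max st.2 (q.1 - st.1 - 1))
      else st)
    (-1, 0)
  max st.2 ((sorted_date_keys.length : Int) - st.1 - 1)

-- ===== PRECONDITION & SPEC =====
-- Pre_ excludes exactly the inputs on which Python A raises KeyError: an assignment dict whose
-- "doctorId" value equals doctor_id but which has no "dateKey" key.
def Pre_max_consecutive_days_off_py (candidate_assignments : List (List (String × String))) (doctor_id : String) (sorted_date_keys : List String) : Prop :=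
  ∀ a ∈ candidate_assignments, PySem.Dict.get? (PySem.Dict.mk a) "doctorId" = some doctor_id → (PySem.Dict.get? (PySem.Dict.mk a) "dateKey").isSome = true
instance (candidate_assignments : List (List (String × String))) (doctor_id : String) (sorted_date_keys : List String) : Decidable (Pre_max_consecutive_days_off_py candidate_assignments doctor_id sorted_date_keys) := by unfold Pre_max_consecutive_days_off_py; infer_instance

def pvWitness_max_consecutive_days_off_py : (List (List (String × String))) × String × List String :=
  ([[("doctorId", "d1"), ("dateKey", "2024-01-02")]], "d1", ["2024-01-01", "2024-01-02", "2024-01-03"])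

def Spec_max_consecutive_days_off_py (candidate_assignments : List (List (String × String))) (doctor_id : String) (sorted_date_keys : List String) (out : Int) : Prop := out = max_consecutive_days_off_py_alt candidate_assignments doctor_id sorted_date_keys
instance (candidate_assignments : List (List (String × String))) (doctor_id : String) (sorted_date_keys : List String) (out : Int) : Decidable (Spec_max_consecutive_days_off_py candidate_assignments doctor_id sorted_date_keys out) := by unfold Spec_max_consecutive_days_off_py; infer_instance

-- ===== CLAIM (what is proved, stated in full; the proofs are below) =====
def Claim_equal_max_consecutive_days_off_py : Prop := ∀ (candidate_assignments : List (List (String × String))) (doctor_id : String) (sorted_date_keys : List String), Dom_max_consecutive_days_off_py candidate_assignments doctor_id sorted_date_keys → Pre_max_consecutive_days_off_py candidate_assignments doctor_id sorted_date_keys → Spec_max_consecutive_days_off_py candidate_assignments doctor_id sorted_date_keys (max_consecutive_days_off_py candidate_assignments doctor_id sorted_date_keys)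

-- ===== LEMMAS AND PROOFS =====

-- `pvG p r l` = the longest run of consecutive elements of `l` on which `p` is false, where the
-- run in progress at the start of `l` already has length `r`.
def pvG (p : String → Bool) : Int → List String → Int
  | r, [] => r
  | r, d :: l => if p d then max r (pvG p 0 l) else pvG p (r + 1) l

theorem pvG_ge (p : String → Bool) (l : List String) : ∀ r : Int, r ≤ pvG p r l := by
  induction l with
  | nil => intro r; simp [pvG]
  | cons d l ih =>
    intro r
    cases hd : p d
    · simp only [pvG, hd, Bool.false_eq_true, if_false]
      have := ih (r + 1)
      omega
    · simp [pvG, hd]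

theorem pvA_fold (p : String → Bool) (l : List String) :
    ∀ L r : Int, 0 ≤ r → r ≤ L →
      (l.foldl (fun (st : Int × Int) dk =>
          if p dk then (st.1, 0)
          else if st.2 + 1 > st.1 then (st.2 + 1, st.2 + 1) else (st.1, st.2 + 1)) (L, r)).1
        = max L (pvG p r l) := by
  induction l with
  | nil => intro L r h0 h; simp [pvG, max_eq_left h]
  | cons d l ih =>
    intro L r h0 h
    cases hd : p d
    · simp only [List.foldl_cons, hd, Bool.false_eq_true, if_false, pvG]
      by_cases hr : r + 1 > L
      · simp only [hr, if_true]
        rw [ih (r + 1) (r + 1) (by omega) le_rfl]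
        have hg := pvG_ge p l (r + 1)
        rw [max_eq_right hg, max_eq_right (le_trans (by omega) hg)]
      · simp only [hr, if_false]
        exact ih L (r + 1) (by omega) (by omega)
    · simp only [List.foldl_cons, hd, if_true, pvG]
      rw [ih L 0 le_rfl (by omega)]
      rw [← max_assoc, max_eq_left h]

theorem pvB_fold (p : String → Bool) (l : List String) :
    ∀ k prev best : Int,
      max ((PySem.List.enumerate l k).foldl
            (fun (st : Int × Int) q =>
              if p q.2 then (q.1, max st.2 (q.1 - st.1 - 1)) else st) (prev, best)).2
          ((k + (l.length : Int)) -
            ((PySem.List.enumerate l k).foldl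
              (fun (st : Int × Int) q =>
                if p q.2 then (q.1, max st.2 (q.1 - st.1 - 1)) else st) (prev, best)).1 - 1)
        = max best (pvG p (k - prev - 1) l) := by
  induction l with
  | nil =>
    intro k prev best
    simp [PySem.List.enumerate_nil, pvG]
  | cons d l ih =>
    intro k prev best
    rw [PySem.List.enumerate_cons]
    cases hd : p d
    · simp only [List.foldl_cons, hd, Bool.false_eq_true, if_false, pvG, List.length_cons]
      have hthis := ih (k + 1) prev best
      have harg : k + 1 - prev - 1 = (k - prev - 1) + 1 := by ring
      rw [harg] at hthis
      push_cast
      have hlen : k + ((l.length : Int) + 1) = (k + 1) + (l.length : Int) := by ring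
      rw [hlen]
      exact hthis
    · simp only [List.foldl_cons, hd, if_true, pvG, List.length_cons]
      have hthis := ih (k + 1) k (max best (k - prev - 1))
      have harg : k + 1 - k - 1 = (0 : Int) := by ring
      rw [harg] at hthis
      push_cast
      have hlen : k + ((l.length : Int) + 1) = (k + 1) + (l.length : Int) := by ring
      rw [hlen, hthis, max_assoc]

-- ===== VERDICT (by name: the statement is the Claim_ definition above) =====
theorem max_consecutive_days_off_py_spec : Claim_equal_max_consecutive_days_off_py := by
  intro ca doc dks _ _
  show max_consecutive_days_off_py ca doc dks = max_consecutive_days_off_py_alt ca doc dks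
  simp only [max_consecutive_days_off_py, max_consecutive_days_off_py_alt]
  have hA := pvA_fold (fun dk => PySem.Set.contains (pvDaysWith ca doc) dk) dks 0 0 le_rfl le_rfl
  have hB := pvB_fold (fun dk => PySem.Set.contains (pvDaysWith ca doc) dk) dks 0 (-1) 0
  have h0 : (0 : Int) - (-1) - 1 = 0 := by ring
  have hz : (0 : Int) + (dks.length : Int) = (dks.length : Int) := by ring
  rw [h0, hz] at hB
  rw [hA, hB]
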